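-- pv_equiv track=rewrite | github.com/ArdynSky/alcove-api | api/main.py | merged_feature_flags
-- ===== SOURCE A (Python) =====
-- DEFAULT_FEATURE_FLAGS = {
--     "pages": {
--         "video_chat": True,
--         "archive": True,
--         "info": True,
--         "wellbeing": True,
--         "pulse": False,
--         "connect": False,
--     },
--     "wellbeing": {
--         "daily_checkin": True,
--         "spotlight": True,
--         "pulse": True,
--     },
-- }
--
-- def merged_feature_flags(saved: dict | None = None) -> dict:
--     flags = {
--         group: values.copy()
--         for group, values in DEFAULT_FEATURE_FLAGS.items()
--     }
--     if not isinstance(saved, dict):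
--         return flags
--     for group, values in saved.items():
--         if group not in flags or not isinstance(values, dict):
--             continue
--         for key, value in values.items():
--             if key in flags[group]:
--                 flags[group][key] = bool(value)
--     return flags
-- ===== SOURCE B (Python) =====
-- DEFAULT_FEATURE_FLAGS = {
--     "pages": {
--         "video_chat": True,
--         "archive": True,
--         "info": True,
--         "wellbeing": True,
--         "pulse": False,
--         "connect": False,
--     },
--     "wellbeing": {
--         "daily_checkin": True,
--         "spotlight": True,
--         "pulse": True,
--     },
-- }
--
--
-- def merged_feature_flags(saved: dict | None = None) -> dict:
--     overrides = saved if isinstance(saved, dict) else {}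
--     return {
--         group: {
--             key: (bool(overrides[group][key])
--                   if isinstance(overrides.get(group), dict) and key in overrides[group]
--                   else default)
--             for key, default in values.items()
--         }
--         for group, values in DEFAULT_FEATURE_FLAGS.items()
--     }
-- ===== Notes on version B (the rewrite author's own statement) =====
-- stated objective: simpler
-- what changed: B inverts the driving collection: instead of copying the defaults and then looping over saved assigning overrides in place, B builds the result in one nested comprehension over DEFAULT_FEATURE_FLAGS, deciding each value by a lookup into saved.
import Mathlib
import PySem

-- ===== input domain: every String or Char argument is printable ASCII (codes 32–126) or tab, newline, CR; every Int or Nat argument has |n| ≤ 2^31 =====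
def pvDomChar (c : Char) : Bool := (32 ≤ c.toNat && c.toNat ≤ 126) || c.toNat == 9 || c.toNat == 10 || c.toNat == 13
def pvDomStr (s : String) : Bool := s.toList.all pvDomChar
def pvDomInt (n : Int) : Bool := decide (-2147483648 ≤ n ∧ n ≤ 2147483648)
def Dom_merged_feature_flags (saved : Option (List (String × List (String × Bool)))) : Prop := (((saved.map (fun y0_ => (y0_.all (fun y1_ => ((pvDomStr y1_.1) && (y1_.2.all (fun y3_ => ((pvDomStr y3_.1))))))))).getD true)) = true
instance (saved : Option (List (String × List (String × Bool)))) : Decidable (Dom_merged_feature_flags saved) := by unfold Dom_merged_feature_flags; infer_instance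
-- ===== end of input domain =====

-- B merges saved flags over the defaults by one nested comprehension driven by the defaults
-- (lookup into saved), instead of copying the defaults and assigning overrides in place: simpler decomposition.


-- ===== PORT A =====
def DEFAULT_FEATURE_FLAGS : List (String × List (String × Bool)) :=
  [("pages", [("video_chat", true), ("archive", true), ("info", true),
              ("wellbeing", true), ("pulse", false), ("connect", false)]),
   ("wellbeing", [("daily_checkin", true), ("spotlight", true), ("pulse", true)])]

-- A, step for step: flags = copy of the defaults; None → return it; else for each (group, values)
-- of saved, skip unknown groups, and for each (key, value) assign flags[group][key] when key is present.
def merged_feature_flags (saved : Option (List (String × List (String × Bool)))) : List (String × List (String × Bool)) :=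
  let flags := DEFAULT_FEATURE_FLAGS.map (fun gv => (gv.1, gv.2))   -- values.copy()
  match saved with
  | none => flags                                                   -- not isinstance(saved, dict)
  | some items =>
    items.foldl (fun flags gv =>
      if flags.any (fun gm => gm.1 == gv.1) then                    -- group in flags (values is always a dict here)
        gv.2.foldl (fun flags kv =>
          flags.map (fun gm =>
            if gm.1 == gv.1 then
              (gm.1,
               if gm.2.any (fun p => p.1 == kv.1) then              -- key in flags[group]
                 gm.2.map (fun p => if p.1 == kv.1 then (p.1, kv.2) else p)   -- flags[group][key] = bool(value)
               else gm.2)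
            else gm)) flags
      else flags) flags                                             -- continue

-- ===== PORT B =====
-- B: one nested comprehension over the defaults; each value decided by lookup into saved.
def merged_feature_flags_alt (saved : Option (List (String × List (String × Bool)))) : List (String × List (String × Bool)) :=
  let overrides := saved.getD []                                    -- saved if isinstance(saved, dict) else {}
  DEFAULT_FEATURE_FLAGS.map (fun gv =>
    (gv.1, gv.2.map (fun kd =>
      (kd.1,
       match List.lookup gv.1 overrides with                        -- overrides.get(group)
       | none => kd.2
       | some m =>
         match List.lookup kd.1 m with                              -- key in overrides[group] → bool(overrides[group][key])
         | none => kd.2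
         | some v => v))))

-- ===== PRECONDITION & SPEC =====
-- Pre_ excludes association lists with duplicate keys (at the group or the key level): such lists do not
-- represent any Python dict value (dict construction collapses duplicates), so no behaviour is specified there.
def Pre_merged_feature_flags (saved : Option (List (String × List (String × Bool)))) : Prop :=
  ((saved.getD []).map Prod.fst).Nodup ∧ ∀ p ∈ saved.getD [], (p.2.map Prod.fst).Nodup
instance (saved : Option (List (String × List (String × Bool)))) : Decidable (Pre_merged_feature_flags saved) := by
  unfold Pre_merged_feature_flags; infer_instance

def pvWitness_merged_feature_flags : (Option (List (String × List (String × Bool)))) :=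
  some [("pages", [("pulse", true), ("connect", true)]), ("other", [("x", false)])]

def Spec_merged_feature_flags (saved : Option (List (String × List (String × Bool)))) (out : List (String × List (String × Bool))) : Prop := out = merged_feature_flags_alt saved
instance (saved : Option (List (String × List (String × Bool)))) (out : List (String × List (String × Bool))) : Decidable (Spec_merged_feature_flags saved out) := by unfold Spec_merged_feature_flags; infer_instance

-- ===== CLAIM (what is proved, stated in full; the proofs are below) =====
def Claim_equal_merged_feature_flags : Prop := ∀ (saved : Option (List (String × List (String × Bool)))), Dom_merged_feature_flags saved → Pre_merged_feature_flags saved → Spec_merged_feature_flags saved (merged_feature_flags saved)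

-- ===== LEMMAS AND PROOFS =====

-- first-match lookup misses a key absent from the key column
theorem lookup_none_of_not_mem_fst {α : Type} (k : String) (l : List (String × α))
    (h : k ∉ l.map Prod.fst) : List.lookup k l = none := by
  induction l with
  | nil => rfl
  | cons p t ih =>
    obtain ⟨a, b⟩ := p
    simp only [List.map_cons, List.mem_cons, not_or] at h
    rw [List.lookup_cons]
    have : (k == a) = false := by simp [h.1]
    rw [this]
    exact ih h.2

-- A's conditional in-place assignment is an unconditional positional map (a miss maps nothing)
theorem applyKV_eq (m : List (String × Bool)) (k : String) (v : Bool) :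
    (if m.any (fun p => p.1 == k) then m.map (fun p => if p.1 == k then (p.1, v) else p) else m)
      = m.map (fun p => if p.1 == k then (p.1, v) else p) := by
  split_ifs with h
  · rfl
  · simp only [List.any_eq_true, not_exists, not_and] at h
    rw [List.map_congr_left (fun p hp => by rw [if_neg (by simpa using h p hp)]), List.map_id']

-- a fold of whole-list maps is the map of the pointwise folds
theorem foldl_map_comm {β γ : Type} (l : List β) (F : List γ) (φ : β → γ → γ) :
    l.foldl (fun F b => F.map (φ b)) F = F.map (fun x => l.foldl (fun x b => φ b x) x) := by
  induction l generalizing F with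
  | nil => simp
  | cons b t ih => simp only [List.foldl_cons, ih, List.map_map]; rfl

-- pointwise group-update fold at the matching group: the group label is stable, the values fold
theorem fold_inner_at (g : String) (l : List (String × Bool)) (m : List (String × Bool)) :
    l.foldl (fun gm kv =>
        if gm.1 == g then
          (gm.1,
           if gm.2.any (fun p => p.1 == kv.1) then
             gm.2.map (fun p => if p.1 == kv.1 then (p.1, kv.2) else p)
           else gm.2)
        else gm) (g, m)
      = (g, l.foldl (fun m kv =>
          if m.any (fun p => p.1 == kv.1) then
            m.map (fun p => if p.1 == kv.1 then (p.1, kv.2) else p)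
          else m) m) := by
  induction l generalizing m with
  | nil => rfl
  | cons kv t ih => simp only [List.foldl_cons, beq_self_eq_true, if_true]; exact ih _

-- pointwise group-update fold at a non-matching entry: identity
theorem fold_inner_skip (g : String) (l : List (String × Bool)) (x : String × List (String × Bool))
    (hx : ¬ x.1 = g) :
    l.foldl (fun gm kv =>
        if gm.1 == g then
          (gm.1,
           if gm.2.any (fun p => p.1 == kv.1) then
             gm.2.map (fun p => if p.1 == kv.1 then (p.1, kv.2) else p)
           else gm.2)
        else gm) x = x := by
  induction l with
  | nil => rfl
  | cons kv t ih =>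
    simp only [List.foldl_cons]
    rw [if_neg (by simpa using hx)]
    exact ih

-- pointwise key-update fold over a duplicate-free override list = one first-match lookup
theorem ptfold_inner (ov : List (String × Bool)) (hnd : (ov.map Prod.fst).Nodup) (p : String × Bool) :
    ov.foldl (fun p kv => if p.1 == kv.1 then (p.1, kv.2) else p) p
      = (p.1, match List.lookup p.1 ov with
              | none => p.2
              | some v => v) := by
  induction ov generalizing p with
  | nil => rfl
  | cons kv t ih =>
    obtain ⟨k, v⟩ := kv
    simp only [List.map_cons, List.nodup_cons] at hnd
    simp only [List.foldl_cons, List.lookup_cons]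
    by_cases h : p.1 = k
    · have hb : (p.1 == k) = true := by simp [h]
      rw [hb]
      simp only [if_true]
      rw [ih hnd.2]
      rw [lookup_none_of_not_mem_fst _ _ (h ▸ hnd.1)]
    · have hb : (p.1 == k) = false := by simp [h]
      rw [hb]
      simp only [Bool.false_eq_true, if_false]
      exact ih hnd.2 p
-- A's inner loop over one saved group, seen pointwise over the default keys
theorem inner_eq (ov : List (String × Bool)) (hnd : (ov.map Prod.fst).Nodup) (m : List (String × Bool)) :
    ov.foldl (fun m kv =>
        if m.any (fun p => p.1 == kv.1) then
          m.map (fun p => if p.1 == kv.1 then (p.1, kv.2) else p)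
        else m) m
      = m.map (fun kd =>
          (kd.1, match List.lookup kd.1 ov with
                 | none => kd.2
                 | some v => v)) := by
  rw [List.foldl_ext _ (fun m (kv : String × Bool) => m.map (fun p => if p.1 == kv.1 then (p.1, kv.2) else p)) m
        (fun m' kv _ => applyKV_eq m' kv.1 kv.2)]
  rw [foldl_map_comm]
  exact List.map_congr_left (fun p _ => ptfold_inner ov hnd p)

-- one step of A's outer loop (group guard + inner loop) is one whole-list map over flags
theorem step_eq (gv : String × List (String × Bool)) (hgv : (gv.2.map Prod.fst).Nodup)
    (F : List (String × List (String × Bool))) :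
    (if F.any (fun gm => gm.1 == gv.1) then
        gv.2.foldl (fun flags kv =>
          flags.map (fun gm =>
            if gm.1 == gv.1 then
              (gm.1,
               if gm.2.any (fun p => p.1 == kv.1) then
                 gm.2.map (fun p => if p.1 == kv.1 then (p.1, kv.2) else p)
               else gm.2)
            else gm)) F
      else F)
      = F.map (fun gm =>
          if gm.1 == gv.1 then
            (gm.1, gm.2.map (fun kd =>
              (kd.1, match List.lookup kd.1 gv.2 with
                     | none => kd.2
                     | some v => v)))
          else gm) := by
  split_ifs with hc
  · rw [foldl_map_comm]
    apply List.map_congr_left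
    intro gm _
    obtain ⟨a, m⟩ := gm
    by_cases hg : a = gv.1
    · subst hg
      rw [fold_inner_at, inner_eq gv.2 hgv m]
      simp
    · rw [fold_inner_skip gv.1 gv.2 (a, m) hg, if_neg (by simpa using hg)]
  · simp only [List.any_eq_true, not_exists, not_and] at hc
    rw [List.map_congr_left (fun gm hgm => by rw [if_neg (by simpa using hc gm hgm)]), List.map_id']


-- pointwise fold of the rewritten outer steps over duplicate-free saved groups = one first-match lookup
theorem ptfold_outer (items : List (String × List (String × Bool)))
    (hnd : (items.map Prod.fst).Nodup) (p : String × List (String × Bool)) :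
    items.foldl (fun gm gv =>
        if gm.1 == gv.1 then
          (gm.1, gm.2.map (fun kd =>
            (kd.1, match List.lookup kd.1 gv.2 with
                   | none => kd.2
                   | some v => v)))
        else gm) p
      = (p.1, match List.lookup p.1 items with
              | none => p.2
              | some ov => p.2.map (fun kd =>
                  (kd.1, match List.lookup kd.1 ov with
                         | none => kd.2
                         | some v => v))) := by
  induction items generalizing p with
  | nil => rfl
  | cons gv t ih =>
    obtain ⟨g, ov⟩ := gv
    simp only [List.map_cons, List.nodup_cons] at hnd
    simp only [List.foldl_cons, List.lookup_cons]
    by_cases h : p.1 = g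
    · have hb : (p.1 == g) = true := by simp [h]
      rw [hb]
      simp only [if_true]
      rw [ih hnd.2]
      rw [lookup_none_of_not_mem_fst _ _ (h ▸ hnd.1)]
    · have hb : (p.1 == g) = false := by simp [h]
      rw [hb]
      simp only [Bool.false_eq_true, if_false]
      exact ih hnd.2 p

theorem merged_eq (items : List (String × List (String × Bool)))
    (hnd : (items.map Prod.fst).Nodup) (hin : ∀ p ∈ items, (p.2.map Prod.fst).Nodup) :
    merged_feature_flags (some items) = merged_feature_flags_alt (some items) := by
  simp only [merged_feature_flags, merged_feature_flags_alt, Option.getD_some]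
  rw [List.foldl_ext _
        (fun F (gv : String × List (String × Bool)) =>
          F.map (fun gm =>
            if gm.1 == gv.1 then
              (gm.1, gm.2.map (fun kd =>
                (kd.1, match List.lookup kd.1 gv.2 with
                       | none => kd.2
                       | some v => v)))
            else gm)) _
        (fun F gv hgv => step_eq gv (hin gv hgv) F)]
  rw [foldl_map_comm, List.map_map]
  apply List.map_congr_left
  intro gv _
  simp only [Function.comp_apply]
  rw [ptfold_outer items hnd (gv.1, gv.2)]
  cases hl : List.lookup gv.1 items with
  | none => simp
  | some ov => rfl

-- ===== VERDICT (by name: the statement is the Claim_ definition above) =====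
theorem merged_feature_flags_spec : Claim_equal_merged_feature_flags := by
  intro saved _ hpre
  unfold Spec_merged_feature_flags
  cases saved with
  | none => rfl
  | some items =>
    obtain ⟨h1, h2⟩ := hpre
    exact merged_eq items (by simpa using h1) (by simpa using h2)
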